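-- pv_equiv track=rewrite | github.com/richardbiro/bakalarska_praca | kod/magickeUtvary.py | vrcholovoSuperbimagickyKompletnyGraf
-- ===== SOURCE A (Python) =====
-- def vrcholovoSuperbimagickyKompletnyGraf(n):
--         if n < 7:
--                 return
--         if n % 4 in {1, 2}:
--                 return
--         if n == 7:
--                 return ([1, 2, 4, 7], [3, 5, 6])
--         if n == 8:
--                 return ([1, 4, 6, 7], [2, 3, 5, 8])
--         if n == 11:
--                 return ([1, 3, 4, 5, 9, 11], [2, 6, 7, 8, 10])
--         if n == 12:
--                 return ([1, 3, 7, 8, 9, 11], [2, 4, 5, 6, 10, 12])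
--
--         H = vrcholovoSuperbimagickyKompletnyGraf(n - 8)
--         for x in range(1, 9):
--                 if x in {1, 4, 6, 7}:
--                         H[0].append(n - 8 + x)
--                 else:
--                         H[1].append(n - 8 + x)
--         return H
-- ===== SOURCE B (Python) =====
-- def vrcholovoSuperbimagickyKompletnyGraf(n):
--     if n < 7 or n % 4 in (1, 2):
--         return None
--     r = n % 8
--     if r == 7:
--         base, L0, L1 = 7, [1, 2, 4, 7], [3, 5, 6]
--     elif r == 0:
--         base, L0, L1 = 8, [1, 4, 6, 7], [2, 3, 5, 8]
--     elif r == 3: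
--         base, L0, L1 = 11, [1, 3, 4, 5, 9, 11], [2, 6, 7, 8, 10]
--     else:
--         base, L0, L1 = 12, [1, 3, 7, 8, 9, 11], [2, 4, 5, 6, 10, 12]
--     for b in range(base + 8, n + 1, 8):
--         for x in range(1, 9):
--             if x in (1, 4, 6, 7):
--                 L0.append(b - 8 + x)
--             else:
--                 L1.append(b - 8 + x)
--     return (L0, L1)
-- ===== Notes on version B (the rewrite author's own statement) =====
-- stated objective: alternative
-- what changed: Replaces A's recursion on n-8 with an iterative construction: the seed bipartition is chosen from n mod 8 and the 8-element blocks are appended in a single forward loop over range(base+8, n+1, 8); B returns A's exact value wherever A returns. Pre_ excludes only huge n (n > 7950 with n%4 in {0,3}) where A's recursion of depth about n/8 overflows CPython's default recursion limit and raises RecursionError; …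
import Mathlib
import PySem

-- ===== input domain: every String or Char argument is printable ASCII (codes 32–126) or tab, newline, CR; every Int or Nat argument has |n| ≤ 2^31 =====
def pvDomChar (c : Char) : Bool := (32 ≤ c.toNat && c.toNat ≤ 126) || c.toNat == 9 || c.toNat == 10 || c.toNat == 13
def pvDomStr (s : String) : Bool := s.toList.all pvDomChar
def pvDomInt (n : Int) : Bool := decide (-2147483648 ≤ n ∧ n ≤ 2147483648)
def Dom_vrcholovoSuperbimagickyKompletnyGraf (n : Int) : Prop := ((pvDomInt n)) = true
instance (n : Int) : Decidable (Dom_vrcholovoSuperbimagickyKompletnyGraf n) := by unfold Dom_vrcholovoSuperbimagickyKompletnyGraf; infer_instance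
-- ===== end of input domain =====

-- B replaces A's recursion on n-8 by an iterative loop from a seed chosen by n mod 8 (alternative decomposition, same cost).

-- ===== PORT A =====
def vrcholovoSuperbimagickyKompletnyGraf (n : Int) : Option (List Int × List Int) :=
  if n < 7 then none
  else if PySem.Int.mod n 4 = 1 ∨ PySem.Int.mod n 4 = 2 then none
  else if n = 7 then some ([1, 2, 4, 7], [3, 5, 6])
  else if n = 8 then some ([1, 4, 6, 7], [2, 3, 5, 8])
  else if n = 11 then some ([1, 3, 4, 5, 9, 11], [2, 6, 7, 8, 10])
  else if n = 12 then some ([1, 3, 7, 8, 9, 11], [2, 4, 5, 6, 10, 12])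
  else
    match vrcholovoSuperbimagickyKompletnyGraf (n - 8) with
    | none => none  -- Python would raise TypeError (None[0]); unreachable for inputs that pass the guards
    | some H =>
      some ((PySem.List.pyRange 1 9 1).foldl
        (fun (h : List Int × List Int) x =>
          if x = 1 ∨ x = 4 ∨ x = 6 ∨ x = 7 then (h.1 ++ [n - 8 + x], h.2)
          else (h.1, h.2 ++ [n - 8 + x])) H)
termination_by n.toNat
decreasing_by omega

-- ===== PORT B =====
-- seed selection: Source B's if/elif chain on r = n % 8, returning (base, L0, L1)
def vsbSeed (r : Int) : Int × List Int × List Int :=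
  if r = 7 then (7, [1, 2, 4, 7], [3, 5, 6])
  else if r = 0 then (8, [1, 4, 6, 7], [2, 3, 5, 8])
  else if r = 3 then (11, [1, 3, 4, 5, 9, 11], [2, 6, 7, 8, 10])
  else (12, [1, 3, 7, 8, 9, 11], [2, 4, 5, 6, 10, 12])

def vrcholovoSuperbimagickyKompletnyGraf_alt (n : Int) : Option (List Int × List Int) :=
  if n < 7 ∨ PySem.Int.mod n 4 = 1 ∨ PySem.Int.mod n 4 = 2 then none
  else
    some ((PySem.List.pyRange ((vsbSeed (PySem.Int.mod n 8)).1 + 8) (n + 1) 8).foldl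
      (fun (h : List Int × List Int) b =>
        (PySem.List.pyRange 1 9 1).foldl
          (fun (h : List Int × List Int) x =>
            if x = 1 ∨ x = 4 ∨ x = 6 ∨ x = 7 then (h.1 ++ [b - 8 + x], h.2)
            else (h.1, h.2 ++ [b - 8 + x])) h)
      (vsbSeed (PySem.Int.mod n 8)).2)

-- ===== PRECONDITION & SPEC =====
-- Pre_ excludes only huge n (n > 7950 with n % 4 ∈ {0,3}) on which Python A's recursion of depth about n/8
-- overflows CPython's default recursion limit and raises RecursionError instead of returning; the exact
-- boundary shifts with the configured limit and the current stack depth, so Pre_ stops a little below the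
-- default-limit boundary, and on any excluded input that a raised limit lets A finish, B returns A's exact
-- value anyway (the equality lemma below holds for ALL n).
def Pre_vrcholovoSuperbimagickyKompletnyGraf (n : Int) : Prop :=
  n ≤ 7950 ∨ PySem.Int.mod n 4 = 1 ∨ PySem.Int.mod n 4 = 2
instance (n : Int) : Decidable (Pre_vrcholovoSuperbimagickyKompletnyGraf n) := by unfold Pre_vrcholovoSuperbimagickyKompletnyGraf; infer_instance
def pvWitness_vrcholovoSuperbimagickyKompletnyGraf : Int := (16)
def Spec_vrcholovoSuperbimagickyKompletnyGraf (n : Int) (out : Option (List Int × List Int)) : Prop := out = vrcholovoSuperbimagickyKompletnyGraf_alt n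
instance (n : Int) (out : Option (List Int × List Int)) : Decidable (Spec_vrcholovoSuperbimagickyKompletnyGraf n out) := by unfold Spec_vrcholovoSuperbimagickyKompletnyGraf; infer_instance

-- ===== CLAIM (what is proved, stated in full; the proofs are below) =====
def Claim_equal_vrcholovoSuperbimagickyKompletnyGraf : Prop := ∀ (n : Int), Dom_vrcholovoSuperbimagickyKompletnyGraf n → Pre_vrcholovoSuperbimagickyKompletnyGraf n → Spec_vrcholovoSuperbimagickyKompletnyGraf n (vrcholovoSuperbimagickyKompletnyGraf n)

-- ===== LEMMAS AND PROOFS =====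

-- range(base+8, n+1, 8) with n ≡ base (mod 8) and base+8 ≤ n splits off its last element n
lemma pyRange8_split (a n : Int) (h1 : a ≤ n) (h2 : (8 : Int) ∣ n - a) :
    PySem.List.pyRange a (n + 1) 8 = PySem.List.pyRange a (n - 7) 8 ++ [n] := by
  obtain ⟨k, hk⟩ := h2
  have hk0 : 0 ≤ k := by omega
  rw [PySem.List.pyRange_of_pos a (n + 1) (by norm_num),
      PySem.List.pyRange_of_pos a (n - 7) (by norm_num)]
  have c1 : (if a < n + 1 then ((n + 1 - a + 8 - 1) / 8).toNat else 0) = k.toNat + 1 := by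
    rw [if_pos (by omega)]
    have : (n + 1 - a + 8 - 1) = (k + 1) * 8 := by omega
    rw [this, Int.mul_ediv_cancel _ (by norm_num)]
    omega
  have c2 : (if a < n - 7 then ((n - 7 - a + 8 - 1) / 8).toNat else 0) = k.toNat := by
    by_cases h : a < n - 7
    · rw [if_pos h]
      have : (n - 7 - a + 8 - 1) = k * 8 := by omega
      rw [this, Int.mul_ediv_cancel _ (by norm_num)]
    · rw [if_neg h]; omega
  rw [c1, c2, List.range_succ, List.map_append]
  simp only [List.map_cons, List.map_nil]
  have : a + 8 * (k.toNat : Int) = n := by omega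
  rw [this]

theorem vrcholovo_eq : ∀ (n : Int),
    vrcholovoSuperbimagickyKompletnyGraf n = vrcholovoSuperbimagickyKompletnyGraf_alt n := by
  have key : ∀ (m : Nat) (n : Int), n.toNat ≤ m →
      vrcholovoSuperbimagickyKompletnyGraf n = vrcholovoSuperbimagickyKompletnyGraf_alt n := by
    intro m
    induction m with
    | zero =>
      intro n hn
      have h7 : n < 7 := by omega
      rw [vrcholovoSuperbimagickyKompletnyGraf, if_pos h7,
          vrcholovoSuperbimagickyKompletnyGraf_alt, if_pos (Or.inl h7)]
    | succ m ih =>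
      intro n hn
      by_cases h7 : n < 7
      · rw [vrcholovoSuperbimagickyKompletnyGraf, if_pos h7,
            vrcholovoSuperbimagickyKompletnyGraf_alt, if_pos (Or.inl h7)]
      · have hm4 : PySem.Int.mod n 4 = n % 4 := PySem.Int.mod_eq_emod_of_pos (by norm_num)
        have hm8 : PySem.Int.mod n 8 = n % 8 := PySem.Int.mod_eq_emod_of_pos (by norm_num)
        by_cases hmod : PySem.Int.mod n 4 = 1 ∨ PySem.Int.mod n 4 = 2
        · rw [vrcholovoSuperbimagickyKompletnyGraf, if_neg h7, if_pos hmod,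
              vrcholovoSuperbimagickyKompletnyGraf_alt, if_pos (Or.inr hmod)]
        · -- n ≥ 7 and n % 4 ∈ {0, 3}
          have hn4 : n % 4 = 0 ∨ n % 4 = 3 := by omega
          by_cases hb : n = 7 ∨ n = 8 ∨ n = 11 ∨ n = 12
          · rcases hb with h | h | h | h <;> subst h <;> rw [vrcholovoSuperbimagickyKompletnyGraf] <;> decide
          · push_neg at hb
            obtain ⟨b7, b8, b11, b12⟩ := hb
            have hn15 : 15 ≤ n := by omega
            -- unfold A one step
            rw [vrcholovoSuperbimagickyKompletnyGraf]
            rw [if_neg h7, if_neg hmod, if_neg b7, if_neg b8, if_neg b11, if_neg b12]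
            rw [ih (n - 8) (by omega)]
            -- both sides now refer to B; relate B n to B (n-8)
            have hm4' : PySem.Int.mod (n - 8) 4 = (n - 8) % 4 := PySem.Int.mod_eq_emod_of_pos (by norm_num)
            have hm8' : PySem.Int.mod (n - 8) 8 = (n - 8) % 8 := PySem.Int.mod_eq_emod_of_pos (by norm_num)
            rw [vrcholovoSuperbimagickyKompletnyGraf_alt,
                if_neg (by push_neg; refine ⟨by omega, ?_, ?_⟩ <;> omega),
                vrcholovoSuperbimagickyKompletnyGraf_alt,
                if_neg (by push_neg; refine ⟨by omega, ?_, ?_⟩ <;> omega)]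
            simp only [hm8, hm8']
            have hr : (n - 8) % 8 = n % 8 := by omega
            rw [hr]
            have hr8 : n % 8 = 7 ∨ n % 8 = 0 ∨ n % 8 = 3 ∨ n % 8 = 4 := by
              rcases hn4 with h | h <;> omega
            have e07 : ((0:Int) = 7) = False := by decide
            have e37 : ((3:Int) = 7) = False := by decide
            have e30 : ((3:Int) = 0) = False := by decide
            have e47 : ((4:Int) = 7) = False := by decide
            have e40 : ((4:Int) = 0) = False := by decide
            have e43 : ((4:Int) = 3) = False := by decide
            rcases hr8 with h | h | h | h <;>
              rw [h] <;> simp only [vsbSeed, e07, e37, e30, e47, e40, e43, reduceIte, if_false] <;>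
              rw [show n - 8 + 1 = n - 7 from by omega]
            · rw [pyRange8_split (7 + 8) n (by omega) (by omega), List.foldl_append]; rfl
            · rw [pyRange8_split (8 + 8) n (by omega) (by omega), List.foldl_append]; rfl
            · rw [pyRange8_split (11 + 8) n (by omega) (by omega), List.foldl_append]; rfl
            · rw [pyRange8_split (12 + 8) n (by omega) (by omega), List.foldl_append]; rfl
  intro n
  exact key n.toNat n (le_refl _)

-- ===== VERDICT (by name: the statement is the Claim_ definition above) =====
theorem vrcholovoSuperbimagickyKompletnyGraf_spec : Claim_equal_vrcholovoSuperbimagickyKompletnyGraf := by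
  intro n _ _
  unfold Spec_vrcholovoSuperbimagickyKompletnyGraf
  exact vrcholovo_eq n
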